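-- pv_equiv track=rewrite | github.com/wzydxb/clawdBoxStore | skills/302ai-api-integration/scripts/parse_api_list.py | search_apis
-- ===== SOURCE A (Python) =====
-- from typing import List, Dict, Optional
--
-- def search_apis(apis: List[Dict[str, str]],
--                 keyword: Optional[str] = None,
--                 category: Optional[str] = None) -> List[Dict[str, str]]:
--     """
--     搜索 API
--
--     Args:
--         apis: API 列表
--         keyword: 关键词（在名称和描述中搜索）
--         category: 分类关键词（在分类路径中搜索）
--
--     Returns:
--         匹配的 API 列表
--     """
--     results = apis
--
--     if category:
--         category_lower = category.lower()
--         results = [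
--             api for api in results
--             if category_lower in api['category'].lower()
--         ]
--
--     if keyword:
--         keyword_lower = keyword.lower()
--         results = [
--             api for api in results
--             if keyword_lower in api['name'].lower() or
--                keyword_lower in api['description'].lower()
--         ]
--
--     return results
-- ===== SOURCE B (Python) =====
-- from typing import List, Dict, Optional
--
-- def search_apis(apis: List[Dict[str, str]],
--                 keyword: Optional[str] = None,
--                 category: Optional[str] = None) -> List[Dict[str, str]]:
--     # Single fused pass instead of two sequential filtering comprehensions.
--     if not keyword and not category:
--         return apis
--     category_lower = category.lower() if category else None
--     keyword_lower = keyword.lower() if keyword else None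
--     results = []
--     for api in apis:
--         if category_lower is not None and category_lower not in api['category'].lower():
--             continue
--         if keyword_lower is not None and \
--            keyword_lower not in api['name'].lower() and \
--            keyword_lower not in api['description'].lower():
--             continue
--         results.append(api)
--     return results
-- ===== Notes on version B (the rewrite author's own statement) =====
-- stated objective: simpler
-- what changed: Replaces A's two sequential filtering comprehensions (each building an intermediate list) with one explicit single-pass loop using continue-guards, lowercasing the filters once, with an identity early-return when no filter is active.
import Mathlib
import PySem

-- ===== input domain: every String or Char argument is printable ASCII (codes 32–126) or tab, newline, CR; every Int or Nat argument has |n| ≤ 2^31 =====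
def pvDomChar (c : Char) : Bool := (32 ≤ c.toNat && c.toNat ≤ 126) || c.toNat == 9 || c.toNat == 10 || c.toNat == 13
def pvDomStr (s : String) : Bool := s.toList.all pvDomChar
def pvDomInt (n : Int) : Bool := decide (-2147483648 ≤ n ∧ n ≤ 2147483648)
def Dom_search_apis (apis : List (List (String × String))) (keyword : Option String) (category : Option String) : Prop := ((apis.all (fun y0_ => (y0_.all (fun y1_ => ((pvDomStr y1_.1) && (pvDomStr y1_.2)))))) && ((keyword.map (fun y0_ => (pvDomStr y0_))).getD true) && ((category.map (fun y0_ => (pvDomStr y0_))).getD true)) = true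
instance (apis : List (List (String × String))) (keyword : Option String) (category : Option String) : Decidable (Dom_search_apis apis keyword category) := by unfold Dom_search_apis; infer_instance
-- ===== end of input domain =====

-- ===== PORT A =====
-- B changes only the decomposition (one fused pass instead of two comprehensions); objective: simpler.
-- Python dicts are association lists; lookup is first match (dGetS), missing key = KeyError, excluded by Pre_.
def dGetS (api : List (String × String)) (k : String) : String :=
  ((api.find? (fun p => p.1 == k)).map Prod.snd).getD ""

def dHasS (api : List (String × String)) (k : String) : Bool :=
  api.any (fun p => p.1 == k)

-- Python truthiness of an Optional[str]: None and "" are falsy.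
def truthyS (o : Option String) : Bool :=
  match o with
  | none => false
  | some s => !(s == "")

def search_apis (apis : List (List (String × String))) (keyword : Option String) (category : Option String) : List (List (String × String)) :=
  let results := apis
  let results :=
    if truthyS category then
      let category_lower := PySem.Str.lower (category.getD "")
      results.filter (fun api => PySem.Str.isIn category_lower (PySem.Str.lower (dGetS api "category")))
    else results
  let results :=
    if truthyS keyword then
      let keyword_lower := PySem.Str.lower (keyword.getD "")
      results.filter (fun api =>
        PySem.Str.isIn keyword_lower (PySem.Str.lower (dGetS api "name")) ||
        PySem.Str.isIn keyword_lower (PySem.Str.lower (dGetS api "description")))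
    else results
  results

-- ===== PORT B =====
-- the single fused loop of Source B: continue-guards, lowered filters passed in once
def searchLoop (kl : Option String) (cl : Option String) : List (List (String × String)) → List (List (String × String))
  | [] => []
  | api :: rest =>
    if cl.isSome && !PySem.Str.isIn (cl.getD "") (PySem.Str.lower (dGetS api "category")) then
      searchLoop kl cl rest
    else if kl.isSome && !PySem.Str.isIn (kl.getD "") (PySem.Str.lower (dGetS api "name")) &&
            !PySem.Str.isIn (kl.getD "") (PySem.Str.lower (dGetS api "description")) then
      searchLoop kl cl rest
    else
      api :: searchLoop kl cl rest

def search_apis_alt (apis : List (List (String × String))) (keyword : Option String) (category : Option String) : List (List (String × String)) :=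
  if !truthyS keyword && !truthyS category then apis
  else
    let category_lower := if truthyS category then some (PySem.Str.lower (category.getD "")) else none
    let keyword_lower := if truthyS keyword then some (PySem.Str.lower (keyword.getD "")) else none
    searchLoop keyword_lower category_lower apis

-- ===== PRECONDITION & SPEC =====
-- Pre_ excludes exactly the inputs where Python A raises KeyError: when the category filter is
-- active, every api must have key 'category'; when the keyword filter is active, every api that
-- survives the category test must have key 'name', and also 'description' unless the name already
-- matched (A short-circuits the 'or').  B raises on exactly the same inputs.
def Pre_search_apis (apis : List (List (String × String))) (keyword : Option String) (category : Option String) : Prop :=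
  ∀ api ∈ apis,
    (truthyS category → dHasS api "category" = true) ∧
    (truthyS keyword →
      (truthyS category = false ∨
       PySem.Str.isIn (PySem.Str.lower (category.getD "")) (PySem.Str.lower (dGetS api "category")) = true) →
      dHasS api "name" = true ∧
      (PySem.Str.isIn (PySem.Str.lower (keyword.getD "")) (PySem.Str.lower (dGetS api "name")) = false →
       dHasS api "description" = true))
instance (apis : List (List (String × String))) (keyword : Option String) (category : Option String) : Decidable (Pre_search_apis apis keyword category) := by unfold Pre_search_apis; infer_instance

def pvWitness_search_apis : (List (List (String × String))) × Option String × Option String :=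
  ([[("category", "Audio/TTS"), ("name", "OpenAI TTS"), ("description", "text to speech")],
    [("category", "Video"), ("name", "Gen"), ("description", "video generation")]],
   some "tts", some "audio")

def Spec_search_apis (apis : List (List (String × String))) (keyword : Option String) (category : Option String) (out : List (List (String × String))) : Prop := out = search_apis_alt apis keyword category
instance (apis : List (List (String × String))) (keyword : Option String) (category : Option String) (out : List (List (String × String))) : Decidable (Spec_search_apis apis keyword category out) := by unfold Spec_search_apis; infer_instance

-- ===== CLAIM (what is proved, stated in full; the proofs are below) =====
def Claim_equal_search_apis : Prop := ∀ (apis : List (List (String × String))) (keyword : Option String) (category : Option String), Dom_search_apis apis keyword category → Pre_search_apis apis keyword category → Spec_search_apis apis keyword category (search_apis apis keyword category)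

-- ===== LEMMAS AND PROOFS =====

-- the fused loop is the filter by the conjunction of the two tests
theorem searchLoop_eq_filter (kl cl : Option String) (apis : List (List (String × String))) :
    searchLoop kl cl apis =
      apis.filter (fun api =>
        !(cl.isSome && !PySem.Str.isIn (cl.getD "") (PySem.Str.lower (dGetS api "category"))) &&
        !(kl.isSome && !PySem.Str.isIn (kl.getD "") (PySem.Str.lower (dGetS api "name")) &&
          !PySem.Str.isIn (kl.getD "") (PySem.Str.lower (dGetS api "description")))) := by
  induction apis with
  | nil => rfl
  | cons api rest ih =>
    simp only [searchLoop, List.filter_cons, ih]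
    rcases h1 : (cl.isSome && !PySem.Str.isIn (cl.getD "") (PySem.Str.lower (dGetS api "category"))) with _ | _ <;>
      rcases h2 : (kl.isSome && !PySem.Str.isIn (kl.getD "") (PySem.Str.lower (dGetS api "name")) &&
          !PySem.Str.isIn (kl.getD "") (PySem.Str.lower (dGetS api "description"))) with _ | _ <;>
    simp only [Bool.not_false, Bool.not_true, Bool.and_self, Bool.and_false, Bool.and_true,
        if_true, if_false, Bool.false_eq_true]

theorem search_apis_spec : Claim_equal_search_apis := by
  intro apis keyword category _hdom _hpre
  unfold Spec_search_apis search_apis search_apis_alt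
  rcases hck : truthyS category with _ | _ <;> rcases hkk : truthyS keyword with _ | _
  · -- both falsy: A applies no filter, B returns apis unchanged
    simp
  · -- keyword filter only
    simp only [Bool.not_true, if_true]
    rw [searchLoop_eq_filter]
    apply List.filter_congr
    intro api _
    simp only [Option.getD_some, Option.isSome_some]
    cases hn : PySem.Str.isIn (PySem.Str.lower (keyword.getD "")) (PySem.Str.lower (dGetS api "name")) <;>
      cases hd : PySem.Str.isIn (PySem.Str.lower (keyword.getD "")) (PySem.Str.lower (dGetS api "description")) <;>
      simp_all
  · -- category filter only
    simp only [Bool.not_true, if_true]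
    rw [searchLoop_eq_filter]
    apply List.filter_congr
    intro api _
    simp only [Option.getD_some, Option.isSome_some]
    cases hc : PySem.Str.isIn (PySem.Str.lower (category.getD "")) (PySem.Str.lower (dGetS api "category")) <;>
      simp_all
  · -- both filters active: fuse A's two filters and compare pointwise
    simp only [Bool.not_true, Bool.and_self, if_true]
    rw [searchLoop_eq_filter, List.filter_filter]
    apply List.filter_congr
    intro api _
    simp [Bool.not_and, Bool.not_not, Bool.and_comm, Bool.or_comm]
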